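-- pv_equiv track=rewrite | github.com/yukigolimlim/New_BSV_OCR_AI_ENHANCED | _NEWOCR_AI_ENHANCED/lookup_tab.py | _pages_for_type
-- ===== SOURCE A (Python) =====
-- def _pages_for_type(page_map: dict, doc_type: str,
--                     total_pages: int, padding: int = 1) -> list:
--     matched = sorted(pg for pg, t in page_map.items() if t == doc_type)
--     if not matched:
--         return []
--     expanded = set()
--     for pg in matched:
--         for offset in range(-padding, padding + 1):
--             n = pg + offset
--             if 1 <= n <= total_pages:
--                 expanded.add(n)
--     return sorted(expanded)
-- ===== SOURCE B (Python) =====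
-- def _pages_for_type(page_map: dict, doc_type: str,
--                     total_pages: int, padding: int = 1) -> list:
--     # Merge clamped padding windows in one forward pass instead of building a set of points and sorting it.
--     pages = sorted(pg for pg, t in page_map.items() if t == doc_type)
--     out = []
--     cur = None  # current open interval (lo, hi)
--     for pg in pages:
--         lo = max(1, pg - padding)
--         hi = min(total_pages, pg + padding)
--         if lo > hi:
--             continue  # window empty (negative padding or page far outside range)
--         if cur is None:
--             cur = (lo, hi)
--         elif lo <= cur[1] + 1:
--             cur = (cur[0], max(cur[1], hi))
--         else:
--             out.extend(range(cur[0], cur[1] + 1))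
--             cur = (lo, hi)
--     if cur is not None:
--         out.extend(range(cur[0], cur[1] + 1))
--     return out
-- ===== Notes on version B (the rewrite author's own statement) =====
-- stated objective: alternative
-- what changed: Instead of expanding every matched page into a set of individual page numbers and sorting the set, B builds each page's clamped window [max(1,pg-padding), min(total_pages,pg+padding)] and merges adjacent/overlapping windows in one forward pass over the sorted pages, emitting each merged interval's integers directly in order; it trades the set+final sort for running interval bounds.
import Mathlib
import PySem

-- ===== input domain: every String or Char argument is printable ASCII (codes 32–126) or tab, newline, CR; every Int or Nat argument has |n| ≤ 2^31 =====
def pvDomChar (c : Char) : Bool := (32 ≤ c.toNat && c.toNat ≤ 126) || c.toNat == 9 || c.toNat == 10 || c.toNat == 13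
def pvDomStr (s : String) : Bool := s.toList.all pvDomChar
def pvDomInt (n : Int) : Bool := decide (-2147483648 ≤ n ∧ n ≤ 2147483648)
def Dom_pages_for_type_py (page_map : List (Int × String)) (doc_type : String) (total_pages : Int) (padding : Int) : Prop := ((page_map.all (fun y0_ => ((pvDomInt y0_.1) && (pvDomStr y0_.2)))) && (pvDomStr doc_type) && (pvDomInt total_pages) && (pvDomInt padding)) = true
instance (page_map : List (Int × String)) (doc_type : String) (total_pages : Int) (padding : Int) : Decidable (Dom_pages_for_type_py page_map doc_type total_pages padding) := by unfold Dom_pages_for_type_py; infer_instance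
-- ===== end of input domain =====

-- ===== PORT A =====
-- B merges clamped padding windows in one forward pass over the sorted matched pages
-- (running interval bounds) instead of expanding every page into a set of points and sorting it.
def pages_for_type_py (page_map : List (Int × String)) (doc_type : String) (total_pages : Int) (padding : Int) : List Int :=
  let matched := PySem.List.sorted
    (((PySem.Dict.ofList page_map).items.filter (fun p => p.2 == doc_type)).map (fun p => p.1))
    (fun x => x) false
  if matched = [] then []
  else
    let expanded : PySem.Set Int := matched.foldl (fun s pg =>
      (PySem.List.pyRange (-padding) (padding + 1) 1).foldl (fun s offset =>
        let n := pg + offset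
        if 1 ≤ n ∧ n ≤ total_pages then PySem.Set.add s n else s) s) PySem.Set.empty
    PySem.List.sorted expanded (fun x => x) false

-- ===== PORT B =====
-- B-side: fold state is (emitted output, current open interval)
def pvStep (total_pages padding : Int) (s : List Int × Option (Int × Int)) (pg : Int) : List Int × Option (Int × Int) :=
  let lo := max 1 (pg - padding)
  let hi := min total_pages (pg + padding)
  if lo > hi then s
  else
    match s.2 with
    | none => (s.1, some (lo, hi))
    | some (a, b) =>
      if lo ≤ b + 1 then (s.1, some (a, max b hi))
      else (s.1 ++ PySem.List.pyRange a (b + 1) 1, some (lo, hi))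

def pvFinish (s : List Int × Option (Int × Int)) : List Int :=
  match s.2 with
  | none => s.1
  | some (a, b) => s.1 ++ PySem.List.pyRange a (b + 1) 1

def pages_for_type_py_alt (page_map : List (Int × String)) (doc_type : String) (total_pages : Int) (padding : Int) : List Int :=
  let pages := PySem.List.sorted
    (((PySem.Dict.ofList page_map).items.filter (fun p => p.2 == doc_type)).map (fun p => p.1))
    (fun x => x) false
  pvFinish (pages.foldl (pvStep total_pages padding) ([], none))

-- ===== PRECONDITION & SPEC =====
def Spec_pages_for_type_py (page_map : List (Int × String)) (doc_type : String) (total_pages : Int) (padding : Int) (out : List Int) : Prop := out = pages_for_type_py_alt page_map doc_type total_pages padding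
instance (page_map : List (Int × String)) (doc_type : String) (total_pages : Int) (padding : Int) (out : List Int) : Decidable (Spec_pages_for_type_py page_map doc_type total_pages padding out) := by unfold Spec_pages_for_type_py; infer_instance

-- ===== CLAIM (what is proved, stated in full; the proofs are below) =====
def Claim_equal_pages_for_type_py : Prop := ∀ (page_map : List (Int × String)) (doc_type : String) (total_pages : Int) (padding : Int), Dom_pages_for_type_py page_map doc_type total_pages padding → Spec_pages_for_type_py page_map doc_type total_pages padding (pages_for_type_py page_map doc_type total_pages padding)

-- ===== LEMMAS AND PROOFS =====


-- A's inner offset loop: adds exactly the in-range points of pg's window to the set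
theorem pvInnerA (tp pg : Int) (xs : List Int) (s : PySem.Set Int) (hs : s.Nodup) :
    (xs.foldl (fun s offset =>
        let n := pg + offset
        if 1 ≤ n ∧ n ≤ tp then PySem.Set.add s n else s) s).Nodup ∧
    ∀ n, n ∈ (xs.foldl (fun s offset =>
        let n := pg + offset
        if 1 ≤ n ∧ n ≤ tp then PySem.Set.add s n else s) s) ↔
      n ∈ s ∨ ∃ off ∈ xs, n = pg + off ∧ 1 ≤ n ∧ n ≤ tp := by
  induction xs generalizing s with
  | nil => simp [hs]
  | cons x xs ih =>
    simp only [List.foldl_cons]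
    by_cases hx : 1 ≤ pg + x ∧ pg + x ≤ tp
    · have h := ih (PySem.Set.add s (pg + x)) (PySem.Set.nodup_add s (pg + x) hs)
      refine ⟨by simpa [hx] using h.1, fun n => ?_⟩
      rw [show (if 1 ≤ pg + x ∧ pg + x ≤ tp then PySem.Set.add s (pg + x) else s) = PySem.Set.add s (pg + x) by simp [hx]]
      rw [h.2 n, PySem.Set.mem_add]
      constructor
      · rintro ((h1 | h1) | ⟨off, hoff, h2⟩)
        · exact Or.inl h1
        · exact Or.inr ⟨x, by simp, by omega⟩
        · exact Or.inr ⟨off, by simp [hoff], h2⟩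
      · rintro (h1 | ⟨off, hoff, h2⟩)
        · exact Or.inl (Or.inl h1)
        · rcases List.mem_cons.mp hoff with h3 | h3
          · exact Or.inl (Or.inr (by omega))
          · exact Or.inr ⟨off, h3, h2⟩
    · have h := ih s hs
      refine ⟨by simpa [hx] using h.1, fun n => ?_⟩
      rw [show (if 1 ≤ pg + x ∧ pg + x ≤ tp then PySem.Set.add s (pg + x) else s) = s by simp [hx]]
      rw [h.2 n]
      constructor
      · rintro (h1 | ⟨off, hoff, h2⟩)
        · exact Or.inl h1
        · exact Or.inr ⟨off, by simp [hoff], h2⟩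
      · rintro (h1 | ⟨off, hoff, h2⟩)
        · exact Or.inl h1
        · rcases List.mem_cons.mp hoff with h3 | h3
          · exact absurd (by omega : 1 ≤ pg + x ∧ pg + x ≤ tp) hx
          · exact Or.inr ⟨off, h3, h2⟩

-- A's outer loop: the set holds exactly the union of the clamped windows
theorem pvOuterA (tp pad : Int) (ps : List Int) (s : PySem.Set Int) (hs : s.Nodup) :
    (ps.foldl (fun s pg =>
        (PySem.List.pyRange (-pad) (pad + 1) 1).foldl (fun s offset =>
          let n := pg + offset
          if 1 ≤ n ∧ n ≤ tp then PySem.Set.add s n else s) s) s).Nodup ∧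
    ∀ n, n ∈ (ps.foldl (fun s pg =>
        (PySem.List.pyRange (-pad) (pad + 1) 1).foldl (fun s offset =>
          let n := pg + offset
          if 1 ≤ n ∧ n ≤ tp then PySem.Set.add s n else s) s) s) ↔
      n ∈ s ∨ ∃ pg ∈ ps, max 1 (pg - pad) ≤ n ∧ n ≤ min tp (pg + pad) := by
  induction ps generalizing s with
  | nil => simp [hs]
  | cons p ps ih =>
    simp only [List.foldl_cons]
    have hin := pvInnerA tp p (PySem.List.pyRange (-pad) (pad + 1) 1) s hs
    have h := ih _ hin.1
    refine ⟨h.1, fun n => ?_⟩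
    rw [h.2 n, hin.2 n]
    have hwin : (∃ off ∈ PySem.List.pyRange (-pad) (pad + 1) 1, n = p + off ∧ 1 ≤ n ∧ n ≤ tp) ↔
        max 1 (p - pad) ≤ n ∧ n ≤ min tp (p + pad) := by
      constructor
      · rintro ⟨off, hoff, rfl, h1, h2⟩
        rw [PySem.List.mem_pyRange_one] at hoff
        omega
      · rintro ⟨h1, h2⟩
        exact ⟨n - p, PySem.List.mem_pyRange_one.mpr (by omega), by omega⟩
    rw [hwin]
    constructor
    · rintro ((h1 | h1) | ⟨pg, hpg, h2⟩)
      · exact Or.inl h1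
      · exact Or.inr ⟨p, by simp, h1⟩
      · exact Or.inr ⟨pg, by simp [hpg], h2⟩
    · rintro (h1 | ⟨pg, hpg, h2⟩)
      · exact Or.inl (Or.inl h1)
      · rcases List.mem_cons.mp hpg with h3 | h3
        · exact Or.inl (Or.inr (h3 ▸ h2))
        · exact Or.inr ⟨pg, h3, h2⟩

-- B's merge loop: invariant-carrying characterisation of the fold
theorem pvMainB (tp pad : Int) (l : List Int) (out : List Int) (cur : Option (Int × Int))
    (hl : l.Pairwise (· ≤ ·))
    (hnone : cur = none → out = [])
    (hsome : ∀ a b, cur = some (a, b) → a ≤ b ∧ out.Pairwise (· < ·) ∧ (∀ x ∈ out, x < a) ∧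
        ∀ pg ∈ l, a ≤ max 1 (pg - pad)) :
    (pvFinish (l.foldl (pvStep tp pad) (out, cur))).Pairwise (· < ·) ∧
    ∀ n, n ∈ pvFinish (l.foldl (pvStep tp pad) (out, cur)) ↔
      n ∈ pvFinish (out, cur) ∨ ∃ pg ∈ l, max 1 (pg - pad) ≤ n ∧ n ≤ min tp (pg + pad) := by
  induction l generalizing out cur with
  | nil =>
    refine ⟨?_, by simp⟩
    match cur with
    | none => simpa [pvFinish] using (hnone rfl) ▸ List.Pairwise.nil
    | some (a, b) =>
      obtain ⟨hab, hout, hlt, -⟩ := hsome a b rfl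
      simp only [List.foldl_nil, pvFinish]
      rw [List.pairwise_append]
      exact ⟨hout, PySem.List.pairwise_lt_pyRange_one a (b + 1), fun x hx y hy => by
        have := hlt x hx
        have := (PySem.List.mem_pyRange_one.mp hy).1
        omega⟩
  | cons pg l ih =>
    have hle : ∀ q ∈ l, pg ≤ q := fun q hq => List.rel_of_pairwise_cons hl hq
    have hl' := hl.of_cons
    simp only [List.foldl_cons]
    by_cases hempty : max 1 (pg - pad) > min tp (pg + pad)
    · -- empty window: state unchanged, window contributes nothing
      have hstep : pvStep tp pad (out, cur) pg = (out, cur) := by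
        simp [pvStep, hempty]
      rw [hstep]
      have h := ih out cur hl' hnone
        (fun a b hab => ⟨(hsome a b hab).1, (hsome a b hab).2.1, (hsome a b hab).2.2.1,
          fun q hq => (hsome a b hab).2.2.2 q (by simp [hq])⟩)
      refine ⟨h.1, fun n => ?_⟩
      rw [h.2 n]
      constructor
      · rintro (h1 | ⟨q, hq, h2⟩)
        · exact Or.inl h1
        · exact Or.inr ⟨q, by simp [hq], h2⟩
      · rintro (h1 | ⟨q, hq, h2⟩)
        · exact Or.inl h1
        · rcases List.mem_cons.mp hq with h3 | h3
          · omega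
          · exact Or.inr ⟨q, h3, h2⟩
    · push Not at hempty
      match cur with
      | none =>
        have hout : out = [] := hnone rfl
        subst hout
        have hstep : pvStep tp pad (([] : List Int), (none : Option (Int × Int))) pg =
            ([], some (max 1 (pg - pad), min tp (pg + pad))) := by
          simp only [pvStep]
          rw [if_neg (by omega)]
        rw [hstep]
        have h := ih [] (some (max 1 (pg - pad), min tp (pg + pad))) hl'
          (by simp)
          (fun a b hab => by
            injection hab with hab
            injection hab with h1 h2
            subst h1; subst h2
            exact ⟨hempty, List.Pairwise.nil, by simp, fun q hq => by have := hle q hq; omega⟩)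
        refine ⟨h.1, fun n => ?_⟩
        rw [h.2 n]
        have e1 : pvFinish (([] : List Int), (none : Option (Int × Int))) = [] := rfl
        have e2 : pvFinish (([] : List Int), some (max 1 (pg - pad), min tp (pg + pad))) =
            PySem.List.pyRange (max 1 (pg - pad)) (min tp (pg + pad) + 1) 1 := rfl
        rw [e1, e2]
        constructor
        · rintro (h1 | ⟨q, hq, h2⟩)
          · have := PySem.List.mem_pyRange_one.mp h1
            exact Or.inr ⟨pg, by simp, by omega⟩
          · exact Or.inr ⟨q, by simp [hq], h2⟩
        · rintro (h1 | ⟨q, hq, h2⟩)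
          · exact absurd h1 (List.not_mem_nil)
          · rcases List.mem_cons.mp hq with h3 | h3
            · exact Or.inl (PySem.List.mem_pyRange_one.mpr (by omega))
            · exact Or.inr ⟨q, h3, h2⟩
      | some (a, b) =>
        obtain ⟨hab, hout, hlt, hfut⟩ := hsome a b rfl
        have ha : a ≤ max 1 (pg - pad) := hfut pg (by simp)
        by_cases hmerge : max 1 (pg - pad) ≤ b + 1
        · -- merge: extend the open interval
          have hstep : pvStep tp pad (out, some (a, b)) pg =
              (out, some (a, max b (min tp (pg + pad)))) := by
            simp only [pvStep]
            rw [if_neg (by omega), if_pos hmerge]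
          rw [hstep]
          have h := ih out (some (a, max b (min tp (pg + pad)))) hl'
            (by simp)
            (fun a' b' hab' => by
              injection hab' with hab'
              injection hab' with h1 h2
              subst h1; subst h2
              exact ⟨by omega, hout, fun x hx => hlt x hx,
                fun q hq => hfut q (by simp [hq])⟩)
          refine ⟨h.1, fun n => ?_⟩
          rw [h.2 n]
          simp only [pvFinish, List.mem_append, PySem.List.mem_pyRange_one]
          constructor
          · rintro ((h1 | h1) | ⟨q, hq, h2⟩)
            · exact Or.inl (Or.inl h1)
            · by_cases hb : n ≤ b
              · exact Or.inl (Or.inr (by omega))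
              · exact Or.inr ⟨pg, by simp, by omega⟩
            · exact Or.inr ⟨q, by simp [hq], h2⟩
          · rintro ((h1 | h1) | ⟨q, hq, h2⟩)
            · exact Or.inl (Or.inl h1)
            · exact Or.inl (Or.inr (by omega))
            · rcases List.mem_cons.mp hq with h3 | h3
              · subst h3; exact Or.inl (Or.inr (by omega))
              · exact Or.inr ⟨q, h3, h2⟩
        · -- gap: emit the closed interval, open a new one
          push Not at hmerge
          have hstep : pvStep tp pad (out, some (a, b)) pg =
              (out ++ PySem.List.pyRange a (b + 1) 1,
               some (max 1 (pg - pad), min tp (pg + pad))) := by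
            simp only [pvStep]
            rw [if_neg (by omega), if_neg (by omega)]
          rw [hstep]
          have hout' : (out ++ PySem.List.pyRange a (b + 1) 1).Pairwise (· < ·) := by
            rw [List.pairwise_append]
            exact ⟨hout, PySem.List.pairwise_lt_pyRange_one a (b + 1), fun x hx y hy => by
              have := hlt x hx
              have := (PySem.List.mem_pyRange_one.mp hy).1
              omega⟩
          have hlt' : ∀ x ∈ out ++ PySem.List.pyRange a (b + 1) 1, x < max 1 (pg - pad) := by
            intro x hx
            rcases List.mem_append.mp hx with h1 | h1
            · have := hlt x h1; omega
            · have := (PySem.List.mem_pyRange_one.mp h1).2; omega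
          have h := ih (out ++ PySem.List.pyRange a (b + 1) 1)
            (some (max 1 (pg - pad), min tp (pg + pad)))
            hl' (by simp)
            (fun a' b' hab' => by
              injection hab' with hab'
              injection hab' with h1 h2
              subst h1; subst h2
              exact ⟨hempty, hout', hlt', fun q hq => by have := hle q hq; omega⟩)
          refine ⟨h.1, fun n => ?_⟩
          rw [h.2 n]
          simp only [pvFinish, List.mem_append, PySem.List.mem_pyRange_one]
          constructor
          · rintro (((h1 | h1) | h1) | ⟨q, hq, h2⟩)
            · exact Or.inl (Or.inl h1)
            · exact Or.inl (Or.inr h1)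
            · exact Or.inr ⟨pg, by simp, by omega⟩
            · exact Or.inr ⟨q, by simp [hq], h2⟩
          · rintro ((h1 | h1) | ⟨q, hq, h2⟩)
            · exact Or.inl (Or.inl (Or.inl h1))
            · exact Or.inl (Or.inl (Or.inr h1))
            · rcases List.mem_cons.mp hq with h3 | h3
              · subst h3; exact Or.inl (Or.inr (by omega))
              · exact Or.inr ⟨q, h3, h2⟩

-- ===== VERDICT (by name: the statement is the Claim_ definition above) =====
theorem pages_for_type_py_spec : Claim_equal_pages_for_type_py := by
  intro page_map doc_type total_pages padding _
  unfold Spec_pages_for_type_py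
  simp only [pages_for_type_py, pages_for_type_py_alt]
  set matched := PySem.List.sorted
    (((PySem.Dict.ofList page_map).items.filter (fun p => p.2 == doc_type)).map (fun p => p.1))
    (fun x => x) false with hmdef
  have hsorted : matched.Pairwise (· ≤ ·) := by
    simpa using PySem.List.sorted_pairwise
      (((PySem.Dict.ofList page_map).items.filter (fun p => p.2 == doc_type)).map (fun p => p.1))
      (fun x => x)
  have hB := pvMainB total_pages padding matched [] none hsorted (fun _ => rfl)
    (fun a b h => by cases h)
  by_cases hnil : matched = []
  · simp [hnil, pvFinish]
  · rw [if_neg hnil]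
    have hA := pvOuterA total_pages padding matched PySem.Set.empty List.nodup_nil
    have hBnodup : (pvFinish (matched.foldl (pvStep total_pages padding) ([], none))).Nodup :=
      hB.1.imp ne_of_lt
    refine PySem.List.sorted_eq_of_perm_of_pairwise_lt _ _ _ ?_ (by simpa using hB.1)
    rw [List.perm_ext_iff_of_nodup hBnodup hA.1]
    intro n
    rw [hB.2 n, hA.2 n]
    simp [pvFinish, PySem.Set.empty]
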